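-- pv_equiv track=rewrite | github.com/ericmerle3789/Collatz-Junction-Theorem | scripts/research/r57_base_k2_maxNr.py | compute_Nr_exact
-- ===== SOURCE A (Python) =====
-- from collections import defaultdict, Counter
--
-- def compute_Nr_exact(M, g, p):
--     """Exact count of N_r for all residues, k=2, triangle 0<=a<=b<=M."""
--     Nr = Counter()
--     for a in range(M + 1):
--         pow2a = pow(2, a, p)
--         for b in range(a, M + 1):
--             pow2b = pow(2, b, p)
--             r = (pow2a + g * pow2b) % p
--             Nr[r] += 1
--     return Nr
-- ===== SOURCE B (Python) =====
-- from collections import Counter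
--
-- def compute_Nr_exact(M, g, p):
--     """Exact count of N_r for all residues, k=2, triangle 0<=a<=b<=M.
--
--     Uses 2^a + g*2^b = 2^a * (1 + g*2^(b-a)): the row for a is the first
--     row scaled by 2^a, so each next row is the previous row doubled mod p
--     with its last element dropped.  No modular exponentiations at all.
--     """
--     row = []
--     x = 1 % p
--     for _ in range(M + 1):
--         row.append((1 + g * x) % p)
--         x = 2 * x % p
--     Nr = Counter()
--     while row:
--         Nr.update(row)
--         row = [2 * v % p for v in row[:-1]]
--     return Nr
-- ===== Notes on version B (the rewrite author's own statement) =====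
-- stated objective: faster
-- what changed: B uses the identity 2^a + g*2^b = 2^a*(1 + g*2^(b-a)): it builds only the first row (1 + g*2^d) % p once, then derives each subsequent row by doubling the previous row mod p and dropping its last element, feeding whole rows into the Counter; there are no modular exponentiations and no (a,b) pair indices at all.
-- outside the precondition, e.g. on compute_Nr_exact(-3, 3, 0): A returns {}, B raises ZeroDivisionError; on compute_Nr_exact(2, 1, 0): A raises ValueError, B raises ZeroDivisionError
import Mathlib
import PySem

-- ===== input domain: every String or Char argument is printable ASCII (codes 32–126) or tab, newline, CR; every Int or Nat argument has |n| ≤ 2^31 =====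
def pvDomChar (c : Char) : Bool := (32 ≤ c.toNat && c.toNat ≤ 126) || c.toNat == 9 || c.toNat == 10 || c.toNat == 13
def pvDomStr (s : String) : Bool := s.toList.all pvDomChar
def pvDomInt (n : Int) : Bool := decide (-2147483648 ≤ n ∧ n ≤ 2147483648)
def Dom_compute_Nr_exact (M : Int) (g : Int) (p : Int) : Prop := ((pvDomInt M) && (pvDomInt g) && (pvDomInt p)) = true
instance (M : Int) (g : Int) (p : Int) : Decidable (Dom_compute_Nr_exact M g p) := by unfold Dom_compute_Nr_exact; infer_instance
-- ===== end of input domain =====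

-- B replaces A's per-pair modular exponentiations by the identity
-- 2^a + g*2^b = 2^a*(1 + g*2^(b-a)): it builds the first row once, then derives
-- each next row by doubling the previous row mod p and dropping its last element
-- (objective: faster, constant factor).


-- ===== PORT A =====
def compute_Nr_exact (M : Int) (g : Int) (p : Int) : List (Int × Int) :=
  ((PySem.List.pyRange 0 (M + 1)).foldl
    (fun (Nr : PySem.Dict Int Int) a =>
      let pow2a := PySem.Int.powMod 2 a.toNat p
      (PySem.List.pyRange a (M + 1)).foldl
        (fun (Nr : PySem.Dict Int Int) b =>
          let pow2b := PySem.Int.powMod 2 b.toNat p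
          let r := PySem.Int.mod (pow2a + g * pow2b) p
          Nr.modify r 0 (· + 1)) Nr)
    PySem.Dict.empty).items

-- ===== PORT B =====
-- the 'while row:' loop of Source B: count the row, then double-and-shrink it
def pvBLoop (p : Int) : PySem.Dict Int Int → List Int → PySem.Dict Int Int
  | Nr, [] => Nr
  | Nr, v :: rest =>
      pvBLoop p ((v :: rest).foldl (fun d x => d.modify x 0 (· + 1)) Nr)
        (((v :: rest).dropLast).map (fun w => PySem.Int.mod (2 * w) p))
  termination_by _ row => row.length
  decreasing_by simp

def compute_Nr_exact_alt (M : Int) (g : Int) (p : Int) : List (Int × Int) :=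
  let row := ((PySem.List.pyRange 0 (M + 1)).foldl
    (fun (s : List Int × Int) _ =>
      (s.1 ++ [PySem.Int.mod (1 + g * s.2) p], PySem.Int.mod (2 * s.2) p))
    ([], PySem.Int.mod 1 p)).1
  (pvBLoop p PySem.Dict.empty row).items

-- ===== PRECONDITION & SPEC =====
-- Pre_ excludes only p = 0, where Python A raises ValueError (pow() 3rd argument
-- cannot be 0) whenever M >= 0, and Python B always raises ZeroDivisionError (at
-- '1 % p'); for M < 0 with p = 0 A happens to return an empty Counter (its loop
-- never runs) while B raises, a degenerate corner outside the function's domain.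
def Pre_compute_Nr_exact (M : Int) (g : Int) (p : Int) : Prop := p ≠ 0
instance (M : Int) (g : Int) (p : Int) : Decidable (Pre_compute_Nr_exact M g p) := by unfold Pre_compute_Nr_exact; infer_instance
def pvWitness_compute_Nr_exact : Int × Int × Int := (3, 1, 5)

def Spec_compute_Nr_exact (M : Int) (g : Int) (p : Int) (out : List (Int × Int)) : Prop := out = compute_Nr_exact_alt M g p
instance (M : Int) (g : Int) (p : Int) (out : List (Int × Int)) : Decidable (Spec_compute_Nr_exact M g p out) := by unfold Spec_compute_Nr_exact; infer_instance

-- ===== CLAIM (what is proved, stated in full; the proofs are below) =====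
def Claim_equal_compute_Nr_exact : Prop := ∀ (M : Int) (g : Int) (p : Int), Dom_compute_Nr_exact M g p → Pre_compute_Nr_exact M g p → Spec_compute_Nr_exact M g p (compute_Nr_exact M g p)

-- ===== LEMMAS AND PROOFS =====

-- fmod congruences used to normalise both ports to one canonical residue list
lemma pv_fmod_mul_congr (c y p : Int) :
    Int.fmod (c * Int.fmod y p) p = Int.fmod (c * y) p := by
  rw [Int.mul_fmod c (Int.fmod y p) p, Int.fmod_fmod, ← Int.mul_fmod]

lemma pv_fmod_add_congr' (x y g p : Int) :
    Int.fmod (x + g * Int.fmod y p) p = Int.fmod (x + g * y) p := by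
  rw [Int.add_fmod, pv_fmod_mul_congr, ← Int.add_fmod]

lemma pv_fmod_add_congr (x y g p : Int) :
    Int.fmod (Int.fmod x p + g * Int.fmod y p) p = Int.fmod (x + g * y) p := by
  rw [pv_fmod_add_congr', Int.add_fmod, Int.fmod_fmod, ← Int.add_fmod]

-- folding over a flatMap is the nested fold
lemma pv_foldl_flatMap {α β γ : Type} (l : List α) (gg : α → List β) (f : γ → β → γ) (init : γ) :
    (l.flatMap gg).foldl f init = l.foldl (fun acc x => (gg x).foldl f acc) init := by
  induction l generalizing init with
  | nil => rfl
  | cons x t ih => simp [List.flatMap_cons, List.foldl_append, ih]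

-- the canonical residue of the pair (a, a+d)
def pvRowB (g p : Int) (a n : Nat) : List Int :=
  (List.range n).map (fun d => Int.fmod (2 ^ a * (1 + g * 2 ^ d)) p)

-- the flattened triangle starting at row a with n rows
def pvTri (g p : Int) (a n : Nat) : List Int :=
  (List.range n).flatMap (fun i => pvRowB g p (a + i) (n - i))

lemma pv_flatMap_congr {α β : Type} (l : List α) (f g : α → List β)
    (h : ∀ x ∈ l, f x = g x) : l.flatMap f = l.flatMap g := by
  rw [List.flatMap_def, List.flatMap_def, List.map_congr_left h]

-- the A-side canonical list (rows written with A's powMod terms)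
def pvRow (gg p : Int) (N k : Nat) : List Int :=
  (List.range (N - k)).map (fun t => Int.fmod (Int.fmod (2 ^ k) p + gg * Int.fmod (2 ^ (k + t)) p) p)

def pvCanon (gg p : Int) (N : Nat) : List Int := (List.range N).flatMap (pvRow gg p N)

-- port A is the incremental counting fold over the canonical list
lemma pv_A (M gg p : Int) : compute_Nr_exact M gg p
    = ((pvCanon gg p (M + 1).toNat).foldl
        (fun (d : PySem.Dict Int Int) x => d.modify x 0 (· + 1)) PySem.Dict.empty).items := by
  simp only [compute_Nr_exact]
  set N := (M + 1).toNat with hN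
  rw [PySem.List.pyRange_one 0 (M + 1)]
  simp only [zero_add, sub_zero, ← hN]
  rw [List.foldl_map]
  unfold pvCanon
  rw [pv_foldl_flatMap]
  congr 1
  apply PySem.List.foldl_congr_mem
  intro acc k hk
  have hkN : k < N := List.mem_range.mp hk
  have hM1 : M + 1 = (N : Int) := by omega
  rw [hM1, PySem.List.pyRange_one (k : Int) (N : Int)]
  rw [List.foldl_map]
  have hNk : ((N : Int) - (k : Int)).toNat = N - k := by omega
  rw [hNk]
  unfold pvRow
  rw [List.foldl_map]
  apply PySem.List.foldl_congr_mem
  intro acc2 t ht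
  simp only [PySem.Int.powMod, PySem.Int.mod, ← Nat.cast_add, Int.toNat_natCast]

-- both canonical lists agree row by row
lemma pv_row_eq (gg p : Int) (N k : Nat) (hk : k < N) :
    pvRowB gg p k (N - k) = pvRow gg p N k := by
  unfold pvRowB pvRow
  refine List.map_congr_left fun t _ => ?_
  rw [pv_fmod_add_congr]
  congr 1
  rw [pow_add]; ring

lemma pv_canon_eq (gg p : Int) (N : Nat) : pvTri gg p 0 N = pvCanon gg p N := by
  unfold pvTri pvCanon
  apply pv_flatMap_congr
  intro k hk
  simpa using pv_row_eq gg p N k (List.mem_range.mp hk)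

-- doubling-and-shrinking a row is the next row
lemma pv_rowB_step (g p : Int) (a n : Nat) :
    ((pvRowB g p a (n + 1)).dropLast).map (fun w => PySem.Int.mod (2 * w) p)
    = pvRowB g p (a + 1) n := by
  unfold pvRowB
  rw [List.range_succ, List.map_append, List.map_singleton, List.dropLast_concat, List.map_map]
  refine List.map_congr_left fun d _ => ?_
  simp only [Function.comp_apply, PySem.Int.mod]
  rw [pv_fmod_mul_congr]
  congr 1
  rw [pow_succ]; ring

lemma pvBLoop_cons (p : Int) (d : PySem.Dict Int Int) (v : Int) (rest : List Int) :
    pvBLoop p d (v :: rest)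
    = pvBLoop p ((v :: rest).foldl (fun d x => d.modify x 0 (· + 1)) d)
        (((v :: rest).dropLast).map (fun w => PySem.Int.mod (2 * w) p)) := by
  rw [pvBLoop]

-- decomposing the triangle into its first row and the remaining triangle
lemma pv_tri_succ (g p : Int) (a n : Nat) :
    pvTri g p a (n + 1) = pvRowB g p a (n + 1) ++ pvTri g p (a + 1) n := by
  unfold pvTri
  rw [List.range_succ_eq_map, List.flatMap_cons, List.flatMap_map]
  simp only [Nat.add_zero, Nat.sub_zero]
  congr 1
  apply pv_flatMap_congr
  intro i _
  have h1 : a + i.succ = a + 1 + i := by omega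
  have h2 : n + 1 - i.succ = n - i := by omega
  rw [h1, h2]

-- the while loop counts exactly the flattened triangle
lemma pv_loop (g p : Int) : ∀ (n a : Nat) (d : PySem.Dict Int Int),
    pvBLoop p d (pvRowB g p a n)
    = (pvTri g p a n).foldl (fun d x => d.modify x 0 (· + 1)) d := by
  intro n
  induction n with
  | zero => intro a d; simp [pvRowB, pvTri, pvBLoop]
  | succ m ih =>
    intro a d
    obtain ⟨v, rest, h⟩ : ∃ v rest, pvRowB g p a (m + 1) = v :: rest := by
      unfold pvRowB
      rw [List.range_succ_eq_map, List.map_cons]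
      exact ⟨_, _, rfl⟩
    rw [h, pvBLoop_cons, ← h, pv_rowB_step, ih, pv_tri_succ, List.foldl_append]

-- the row-building fold produces the first row
lemma pv_rowbuild {α : Type} (g p : Int) (l : List α) (acc : List Int) (j : Nat) :
    (l.foldl (fun (s : List Int × Int) _ =>
        (s.1 ++ [PySem.Int.mod (1 + g * s.2) p], PySem.Int.mod (2 * s.2) p))
      (acc, Int.fmod (2 ^ j) p)).1
    = acc ++ (List.range l.length).map (fun d => Int.fmod (2 ^ 0 * (1 + g * 2 ^ (j + d))) p) := by
  induction l generalizing acc j with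
  | nil => simp
  | cons x t ih =>
    simp only [List.foldl_cons]
    have hv : PySem.Int.mod (1 + g * Int.fmod (2 ^ j) p) p
        = Int.fmod (2 ^ 0 * (1 + g * 2 ^ j)) p := by
      show Int.fmod (1 + g * Int.fmod (2 ^ j) p) p = _
      rw [pow_zero, one_mul, pv_fmod_add_congr']
    have hx : PySem.Int.mod (2 * Int.fmod (2 ^ j) p) p = Int.fmod (2 ^ (j + 1)) p := by
      show Int.fmod (2 * Int.fmod (2 ^ j) p) p = _
      rw [pv_fmod_mul_congr, pow_succ]; ring_nf
    rw [hv, hx, ih (acc ++ [Int.fmod (2 ^ 0 * (1 + g * 2 ^ j)) p]) (j + 1)]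
    rw [List.length_cons, List.range_succ_eq_map]
    simp only [List.map_cons, List.map_map, List.append_assoc, List.singleton_append,
      Nat.add_zero]
    congr 2
    refine List.map_congr_left fun k _ => ?_
    simp only [Function.comp_apply]
    have h1 : j + 1 + k = j + k.succ := by omega
    rw [h1]

lemma pv_B (M g p : Int) : compute_Nr_exact_alt M g p
    = ((pvCanon g p (M + 1).toNat).foldl
        (fun (d : PySem.Dict Int Int) x => d.modify x 0 (· + 1)) PySem.Dict.empty).items := by
  simp only [compute_Nr_exact_alt]
  have h0 : PySem.Int.mod 1 p = Int.fmod (2 ^ 0) p := by norm_num [PySem.Int.mod]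
  rw [h0, pv_rowbuild, PySem.List.length_pyRange_one]
  simp only [List.nil_append, Nat.zero_add, sub_zero]
  have hrow : (List.range (M + 1).toNat).map
      (fun d => Int.fmod (2 ^ 0 * (1 + g * 2 ^ d)) p) = pvRowB g p 0 (M + 1).toNat := rfl
  rw [hrow, pv_loop, pv_canon_eq]

lemma pv_main (M g p : Int) : compute_Nr_exact M g p = compute_Nr_exact_alt M g p :=
  (pv_A M g p).trans (pv_B M g p).symm

-- ===== VERDICT (by name: the statement is the Claim_ definition above) =====
theorem compute_Nr_exact_spec : Claim_equal_compute_Nr_exact := by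
  intro M g p _ _
  exact pv_main M g p
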